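-- pv_equiv track=rewrite | github.com/wuhonglei/dh_ai | 第一期/week8-word2vec词嵌入算法/NNLM/train.py | make_train_data
-- ===== SOURCE A (Python) =====
-- def make_train_data(raw_text: list[str], context_size: int):
--     data = []
--     for line in raw_text:
--         words = line.split()
--         if len(words) < context_size + 1:
--             continue
--
--         for i in range(context_size, len(words)):
--             context = words[i-context_size:i]
--             target = words[i]
--             data.append((context, target))
--
--     return data
-- ===== SOURCE B (Python) =====
-- def make_train_data(raw_text: list[str], context_size: int):
--     data = []
--     for line in raw_text:
--         words = line.split()
--         if context_size < len(words):
--             for window in zip(*[words[j:] for j in range(context_size + 1)]):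
--                 data.append((list(window[:-1]), window[-1]))
--     return data
-- ===== Notes on version B (the rewrite author's own statement) =====
-- stated objective: idiomatic
-- what changed: Replaces the index-based inner loop (words[i-context_size:i] sliced per target index i) with parallel iteration: zip over context_size+1 shifted copies of the word list yields each window directly, its stop-at-shortest rule producing nothing for short lines (a guard only skips building the shifts when the line is shorter than the window).
-- outside the precondition, e.g. on make_train_data(['a b'], -1): A returns [(['a'], 'b'), ([], 'a'), ([], 'b')], B returns []
import Mathlib
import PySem

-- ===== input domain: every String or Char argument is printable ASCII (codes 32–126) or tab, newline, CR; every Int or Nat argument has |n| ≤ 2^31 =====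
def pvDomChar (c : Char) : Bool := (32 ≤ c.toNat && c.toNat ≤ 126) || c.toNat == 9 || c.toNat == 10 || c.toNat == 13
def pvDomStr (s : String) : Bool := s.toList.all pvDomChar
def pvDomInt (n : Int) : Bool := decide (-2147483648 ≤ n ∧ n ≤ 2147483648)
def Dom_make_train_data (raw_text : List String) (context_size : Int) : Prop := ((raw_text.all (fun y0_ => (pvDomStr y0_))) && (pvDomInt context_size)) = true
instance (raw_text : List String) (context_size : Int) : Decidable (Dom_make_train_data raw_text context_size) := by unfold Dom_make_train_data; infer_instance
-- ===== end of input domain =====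

-- B replaces A's index-based slicing per target index with Python's zip over context_size+1
-- shifted copies of the word list (idiomatic parallel iteration); negative context_size is
-- excluded by Pre_ as outside the task's natural domain.


-- ===== PORT A =====
def make_train_data (raw_text : List String) (context_size : Int) : List (List String × String) :=
  raw_text.foldl (fun data line =>
    let words := PySem.Str.split₀ line
    if PySem.List.len words < context_size + 1 then data
    else
      (PySem.List.pyRange context_size (PySem.List.len words) 1).foldl (fun data i =>
        let context := PySem.List.slice words (some (i - context_size)) (some i)
        -- i is always in range here (k ≤ i < len words), so the total pyGetD is exact
        let target := PySem.List.pyGetD words i ""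
        data ++ [(context, target)]) data) []

-- ===== PORT B =====
-- Python's zip(*lss) by its contract: stop at the shortest list
def pyZipN (lss : List (List String)) : List (List String) :=
  (List.range ((lss.map List.length).min?.getD 0)).map (fun i => lss.map (fun l => l.getD i ""))

def make_train_data_alt (raw_text : List String) (context_size : Int) : List (List String × String) :=
  raw_text.foldl (fun data line =>
    let words := PySem.Str.split₀ line
    if context_size < PySem.List.len words then
      let shifts := (PySem.List.pyRange 0 (context_size + 1) 1).map
        (fun j => PySem.List.slice words (some j) none)
      data ++ (pyZipN shifts).map (fun w => (w.dropLast, w.getLastD ""))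
    else data) []

-- ===== PRECONDITION & SPEC =====
-- Pre_ restricts to the natural domain context_size ≥ 0: for negative context_size A's
-- negative-index slicing still returns accidental windows while B's zip of no lists yields [].
def Pre_make_train_data (raw_text : List String) (context_size : Int) : Prop := 0 ≤ context_size
instance (raw_text : List String) (context_size : Int) : Decidable (Pre_make_train_data raw_text context_size) := by unfold Pre_make_train_data; infer_instance
def pvWitness_make_train_data : List String × Int := (["a b c d", "x"], 2)

def Spec_make_train_data (raw_text : List String) (context_size : Int) (out : List (List String × String)) : Prop := out = make_train_data_alt raw_text context_size
instance (raw_text : List String) (context_size : Int) (out : List (List String × String)) : Decidable (Spec_make_train_data raw_text context_size out) := by unfold Spec_make_train_data; infer_instance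

-- ===== CLAIM (what is proved, stated in full; the proofs are below) =====
def Claim_equal_make_train_data : Prop := ∀ (raw_text : List String) (context_size : Int), Dom_make_train_data raw_text context_size → Pre_make_train_data raw_text context_size → Spec_make_train_data raw_text context_size (make_train_data raw_text context_size)

-- ===== LEMMAS AND PROOFS =====

-- the common per-window value: context = words[t:t+k], target = words[t+k]
def pvWin (words : List String) (k t : Nat) : List String × String :=
  ((List.range k).map (fun j => words.getD (t + j) ""), words.getD (t + k) "")

lemma pv_min_shift_lengths (k n : Nat) :
    (((List.range (k + 1)).map (fun j => n - j)).min?.getD 0) = n - k := by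
  have h : ((List.range (k + 1)).map (fun j => n - j)).min? = some (n - k) := by
    rw [List.min?_eq_some_iff]
    constructor
    · exact List.mem_map.2 ⟨k, by simp, rfl⟩
    · intro b hb
      rcases List.mem_map.1 hb with ⟨j, hj, rfl⟩
      have : j ≤ k := Nat.lt_succ_iff.1 (List.mem_range.1 hj)
      omega
  simp [h]

-- B's per-line value, characterised
lemma pv_lineB (k : Nat) (words : List String) :
    (pyZipN ((PySem.List.pyRange 0 ((k : Int) + 1) 1).map
        (fun j => PySem.List.slice words (some j) none))).map
      (fun w => (w.dropLast, w.getLastD "")) =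
    (List.range (words.length - k)).map (pvWin words k) := by
  rw [show ((k : Int) + 1) = ((k + 1 : Nat) : Int) by push_cast; ring,
     PySem.List.pyRange_zero_natCast, List.map_map]
  have hsh : ((List.range (k + 1)).map ((fun j => PySem.List.slice words (some j) none) ∘ (fun t : Nat => (t : Int))))
      = (List.range (k + 1)).map (fun j => words.drop j) := by
    apply List.map_congr_left
    intro j _
    simp [PySem.List.slice_from_natCast]
  rw [hsh]
  unfold pyZipN
  rw [List.map_map]
  have hlen : (((List.range (k + 1)).map (fun j => words.drop j)).map List.length).min?.getD 0
      = words.length - k := by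
    rw [List.map_map]
    have : (List.length ∘ fun j => words.drop j) = (fun j => words.length - j) := by
      funext j; simp
    rw [this, pv_min_shift_lengths]
  rw [hlen]
  apply List.map_congr_left
  intro t ht
  have htk : t + k < words.length := by
    have := List.mem_range.1 ht; omega
  simp only [Function.comp_apply]
  rw [List.map_map]
  have hwin : ((List.range (k + 1)).map ((fun l => l.getD t "") ∘ fun j => words.drop j))
      = (List.range (k + 1)).map (fun j => words.getD (t + j) "") := by
    apply List.map_congr_left
    intro j _
    simp [Nat.add_comm]
  rw [hwin]
  simp only [pvWin, Prod.mk.injEq]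
  constructor
  · rw [List.range_succ, List.map_append, List.dropLast_append_of_ne_nil] <;> simp
  · rw [List.range_succ]
    simp

-- A's per-line value, characterised (words[t:t+k] as getD-map, valid since t+k < len)
lemma pv_take_drop_eq (words : List String) (k t : Nat) (h : t + k ≤ words.length) :
    (words.drop t).take k = (List.range k).map (fun j => words.getD (t + j) "") := by
  apply List.ext_getElem
  · simp; omega
  · intro i h1 h2
    have hi : i < k := by simpa using h2
    simp [List.getD, List.getElem?_eq_getElem (by omega : t + i < words.length)]

lemma pv_lineA (k : Nat) (words : List String) :
    (if PySem.List.len words < (k : Int) + 1 then ([] : List (List String × String))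
     else (PySem.List.pyRange (k : Int) (PySem.List.len words) 1).map
       (fun i => (PySem.List.slice words (some (i - (k : Int))) (some i),
                  PySem.List.pyGetD words i ""))) =
    (List.range (words.length - k)).map (pvWin words k) := by
  by_cases h : words.length < k + 1
  · rw [if_pos (by simp [PySem.List.len]; omega)]
    have : words.length - k = 0 := by omega
    simp [this]
  · have hlen : k + 1 ≤ words.length := by omega
    rw [if_neg (by simp [PySem.List.len]; omega)]
    simp only [PySem.List.len]
    rw [PySem.List.pyRange_of_pos _ _ (by norm_num : (0:Int) < 1),
        if_pos (by omega)]
    rw [show ((words.length : Int) - (k : Int) + 1 - 1) / 1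
        = (words.length : Int) - (k : Int) + 1 - 1 from Int.ediv_one _]
    rw [show ((words.length : Int) - (k : Int) + 1 - 1).toNat = words.length - k by omega]
    rw [List.map_map]
    apply List.map_congr_left
    intro t ht
    have htk : t + k < words.length := by
      have := List.mem_range.1 ht; omega
    simp only [Function.comp_apply, one_mul]
    rw [show (k : Int) + (t : Int) - (k : Int) = ((t : Nat) : Int) by ring]
    rw [show (k : Int) + (t : Int) = ((t : Nat) : Int) + ((k : Nat) : Int) by ring,
        PySem.List.slice_natCast_add]
    rw [show ((t : Int) + (k : Int)) = (((t + k : Nat)) : Int) by push_cast; ring,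
        PySem.List.pyGetD_natCast]
    rw [pv_take_drop_eq words k t (by omega)]
    rfl

-- per-line equality, packaged for the fold
def pvLineB (k : Nat) (line : String) : List (List String × String) :=
  (List.range ((PySem.Str.split₀ line).length - k)).map (pvWin (PySem.Str.split₀ line) k)

-- B's guarded per-line value agrees (when the guard fails, the range is empty too)
lemma pv_lineB_guard (k : Nat) (words : List String) :
    (if (k : Int) < PySem.List.len words then
      (pyZipN ((PySem.List.pyRange 0 ((k : Int) + 1) 1).map
          (fun j => PySem.List.slice words (some j) none))).map
        (fun w => (w.dropLast, w.getLastD ""))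
     else []) =
    (List.range (words.length - k)).map (pvWin words k) := by
  by_cases h : k < words.length
  · rw [if_pos (by simp [PySem.List.len]; omega), pv_lineB]
  · rw [if_neg (by simp [PySem.List.len]; omega)]
    simp [show words.length - k = 0 by omega]

lemma pv_foldA (k : Nat) (l : List String) (acc : List (List String × String)) :
    l.foldl (fun data line =>
      let words := PySem.Str.split₀ line
      if PySem.List.len words < (k : Int) + 1 then data
      else
        (PySem.List.pyRange (k : Int) (PySem.List.len words) 1).foldl (fun data i =>
          data ++ [(PySem.List.slice words (some (i - (k : Int))) (some i),
                    PySem.List.pyGetD words i "")]) data) acc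
    = acc ++ l.flatMap (pvLineB k) := by
  induction l generalizing acc with
  | nil => simp
  | cons x xs ih =>
    rw [List.foldl_cons, ih, List.flatMap_cons]
    have hx : (let words := PySem.Str.split₀ x
        if PySem.List.len words < (k : Int) + 1 then acc
        else
          (PySem.List.pyRange (k : Int) (PySem.List.len words) 1).foldl (fun data i =>
            data ++ [(PySem.List.slice words (some (i - (k : Int))) (some i),
                      PySem.List.pyGetD words i "")]) acc)
        = acc ++ pvLineB k x := by
      show (if PySem.List.len (PySem.Str.split₀ x) < (k : Int) + 1 then acc
        else _) = _
      rw [PySem.List.foldl_append_singleton_eq_map]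
      have := pv_lineA k (PySem.Str.split₀ x)
      unfold pvLineB
      by_cases h : PySem.List.len (PySem.Str.split₀ x) < (k : Int) + 1
      · rw [if_pos h] at this ⊢
        rw [← this]; simp
      · rw [if_neg h] at this ⊢
        rw [← this]
    rw [hx, List.append_assoc]


lemma pv_foldB (k : Nat) (l : List String) (acc : List (List String × String)) :
    l.foldl (fun data line =>
      let words := PySem.Str.split₀ line
      if (k : Int) < PySem.List.len words then
        let shifts := (PySem.List.pyRange 0 ((k : Int) + 1) 1).map
          (fun j => PySem.List.slice words (some j) none)
        data ++ (pyZipN shifts).map (fun w => (w.dropLast, w.getLastD ""))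
      else data) acc
    = acc ++ l.flatMap (pvLineB k) := by
  induction l generalizing acc with
  | nil => simp
  | cons x xs ih =>
    rw [List.foldl_cons, ih, List.flatMap_cons, ← List.append_assoc]
    congr 1
    show (if (k : Int) < PySem.List.len (PySem.Str.split₀ x) then _ else acc) = _
    have := pv_lineB_guard k (PySem.Str.split₀ x)
    unfold pvLineB
    by_cases h : (k : Int) < PySem.List.len (PySem.Str.split₀ x)
    · rw [if_pos h] at this ⊢
      exact congrArg (acc ++ ·) this
    · rw [if_neg h] at this ⊢
      rw [← this]; simp

-- ===== VERDICT (by name: the statement is the Claim_ definition above) =====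
theorem make_train_data_spec : Claim_equal_make_train_data := by
  intro raw_text context_size _ hpre
  obtain ⟨k, rfl⟩ := Int.eq_ofNat_of_zero_le hpre
  show make_train_data raw_text (k : Int) = make_train_data_alt raw_text (k : Int)
  unfold make_train_data make_train_data_alt
  rw [pv_foldA k raw_text [], pv_foldB k raw_text []]
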